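-- pv_equiv track=rewrite | github.com/shunsuke-tsumori/atcoder_solutions | src/contest/a.py | compute_depth_all
-- ===== SOURCE A (Python) =====
-- def compute_depth_all(N, parent):
--     """
--     parent 配列から各頂点の高さ h_v を計算して返す。
--     BFS を根ごとに行う。
--     """
--     depth = [-1] * N
--
--     from collections import deque
--     for v in range(N):
--         if parent[v] == -1:
--             depth[v] = 0
--             queue = deque([v])
--             while queue:
--                 cur = queue.popleft()
--                 for w in range(N):
--                     if parent[w] == cur:
--                         depth[w] = depth[cur] + 1
--                         queue.append(w)
--
--     return depth
-- ===== SOURCE B (Python) =====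
-- def compute_depth_all(N, parent):
--     """
--     Depth of each vertex, by memoised upward walks: follow the parent chain from v
--     until a root (-1), an already-computed vertex, an out-of-range parent, or a
--     cycle (more than N steps), then write the depths back along the walked path.
--     Each vertex is finalised once.
--     -2 marks a not-yet-computed entry; -1 is the final value of rootless vertices.
--     """
--     depth = [-2] * N
--     for v in range(N):
--         path = []
--         u = v
--         while 0 <= u < N and depth[u] == -2 and len(path) <= N:
--             path.append(u)
--             u = parent[u]
--         if u == -1:
--             base = 0
--         elif 0 <= u < N and depth[u] >= 0:
--             base = depth[u] + 1
--         else: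
--             base = -1
--         for node in reversed(path):
--             if base >= 0:
--                 depth[node] = base
--                 base += 1
--             else:
--                 depth[node] = -1
--     return depth
-- ===== Notes on version B (the rewrite author's own statement) =====
-- stated objective: alternative
-- what changed: A runs a BFS from every root and finds the children of each dequeued node by rescanning all N vertices; B instead computes depths by walking up each vertex's parent chain with memoisation, writing results back along the walked path, so no per-node child scan over all vertices is needed.
import Mathlib
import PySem

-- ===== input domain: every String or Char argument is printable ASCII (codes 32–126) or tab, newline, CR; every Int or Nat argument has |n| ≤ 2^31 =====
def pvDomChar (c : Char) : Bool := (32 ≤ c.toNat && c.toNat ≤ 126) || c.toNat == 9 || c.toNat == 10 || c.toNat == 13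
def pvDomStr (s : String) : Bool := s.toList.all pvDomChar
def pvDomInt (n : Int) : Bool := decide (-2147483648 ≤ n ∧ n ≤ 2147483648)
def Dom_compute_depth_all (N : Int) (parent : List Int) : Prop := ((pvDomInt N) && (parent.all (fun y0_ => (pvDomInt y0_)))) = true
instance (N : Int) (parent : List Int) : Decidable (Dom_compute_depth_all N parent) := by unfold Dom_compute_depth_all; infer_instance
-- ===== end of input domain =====

-- B replaces A's per-root BFS (which rescans all N vertices to find the children of each
-- dequeued node) by memoised upward parent-chain walks with write-back; objective: alternative.

-- ===== PORT A =====
-- inner 'for w in range(N)' of the BFS: sets depth[w] and appends w for every child w of cur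
def aInner (N : Int) (parent : List Int) (cur : Int) (st : List Int × List Int) : List Int × List Int :=
  (PySem.List.pyRange 0 N 1).foldl
    (fun st w =>
      if PySem.List.pyGetD parent w 0 = cur then
        (PySem.List.pySetD st.1 w (PySem.List.pyGetD st.1 cur 0 + 1), st.2 ++ [w])
      else st) st

-- 'while queue:' loop; the fuel N+1 bounds the number of iterations (each dequeued vertex is
-- dequeued once, proved below), so on inputs Python terminates on the recursion never runs out
def aBFS (N : Int) (parent : List Int) : Nat → List Int → List Int → List Int
  | _, depth, [] => depth
  | 0, depth, _ :: _ => depth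
  | fuel+1, depth, cur :: rest =>
      let st := aInner N parent cur (depth, rest)
      aBFS N parent fuel st.1 st.2

def compute_depth_all (N : Int) (parent : List Int) : List Int :=
  (PySem.List.pyRange 0 N 1).foldl
    (fun depth v =>
      if PySem.List.pyGetD parent v 0 = -1 then
        aBFS N parent (N.toNat + 1) (PySem.List.pySetD depth v 0) [v]
      else depth)
    (List.replicate N.toNat (-1))

-- ===== PORT B =====
-- the upward walk: follow parents while the vertex is in range, not yet computed (-2) and
-- the path is short enough; returns the collected path and the final pointer
def bWalk (N : Int) (parent depth : List Int) : Nat → List Int → Int → (List Int × Int)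
  | 0, path, u => (path, u)
  | fuel+1, path, u =>
      if 0 ≤ u ∧ u < N ∧ PySem.List.pyGetD depth u 0 = -2 ∧ (path.length : Int) ≤ N then
        bWalk N parent depth fuel (path ++ [u]) (PySem.List.pyGetD parent u 0)
      else (path, u)

def compute_depth_all_alt (N : Int) (parent : List Int) : List Int :=
  (PySem.List.pyRange 0 N 1).foldl
    (fun depth v =>
      let pu := bWalk N parent depth (N.toNat + 2) [] v
      let base : Int :=
        if pu.2 = -1 then 0
        else if 0 ≤ pu.2 ∧ pu.2 < N ∧ 0 ≤ PySem.List.pyGetD depth pu.2 0 then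
          PySem.List.pyGetD depth pu.2 0 + 1
        else -1
      (pu.1.reverse.foldl
        (fun st node =>
          if 0 ≤ st.2 then (PySem.List.pySetD st.1 node st.2, st.2 + 1)
          else (PySem.List.pySetD st.1 node (-1), st.2)) (depth, base)).1)
    (List.replicate N.toNat (-2))

-- ===== PRECONDITION & SPEC =====
-- Pre_ excludes exactly the inputs where Python A raises IndexError: N > len(parent)
def Pre_compute_depth_all (N : Int) (parent : List Int) : Prop := N ≤ (parent.length : Int)
instance (N : Int) (parent : List Int) : Decidable (Pre_compute_depth_all N parent) := by
  unfold Pre_compute_depth_all; infer_instance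
def pvWitness_compute_depth_all : Int × List Int := (4, [-1, 0, 1, -1])

def Spec_compute_depth_all (N : Int) (parent : List Int) (out : List Int) : Prop := out = compute_depth_all_alt N parent
instance (N : Int) (parent : List Int) (out : List Int) : Decidable (Spec_compute_depth_all N parent out) := by unfold Spec_compute_depth_all; infer_instance

-- ===== CLAIM (what is proved, stated in full; the proofs are below) =====
def Claim_equal_compute_depth_all : Prop := ∀ (N : Int) (parent : List Int), Dom_compute_depth_all N parent → Pre_compute_depth_all N parent → Spec_compute_depth_all N parent (compute_depth_all N parent)

-- ===== LEMMAS AND PROOFS =====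

-- parent of a vertex (getD coincides with Python's parent[w] on all indices A touches)
def par (parent : List Int) (w : Nat) : Int := parent.getD w 0

-- k-fold parent step (staying inside [0, N)); `none` = the chain left the vertex range
def iterN (N : Int) (parent : List Int) : Nat → Nat → Option Nat
  | 0, w => some w
  | k+1, w =>
      if 0 ≤ par parent w ∧ par parent w < N then iterN N parent k (par parent w).toNat else none

-- fuelled "number of steps to reach -1" (none = fuel out / chain leaves the range)
def dstep (N : Int) (parent : List Int) : Nat → Int → Option Nat
  | 0, _ => none
  | fuel+1, u =>
      if u = -1 then some 0
      else if 0 ≤ u ∧ u < N then (dstep N parent fuel (PySem.List.pyGetD parent u 0)).map (· + 1)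
      else none

-- the common value both programs compute for vertex w
def sv (N : Int) (parent : List Int) (w : Nat) : Int :=
  (dstep N parent (N.toNat + 1) (w : Int)).elim (-1) (fun k => (k : Int) - 1)

def belb (N : Int) (parent : List Int) (r w : Nat) : Bool :=
  (List.range (N.toNat + 1)).any (fun k => iterN N parent k w == some r)

def isRootb (parent : List Int) (r : Nat) : Bool := par parent r == -1

def oldb (N : Int) (parent : List Int) (m w : Nat) : Bool :=
  (List.range m).any (fun r => isRootb parent r && belb N parent r w)

-- depth array after the outer loop has processed indices < m
def outerArr (N : Int) (parent : List Int) (m : Nat) : List Int :=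
  (List.range N.toNat).map (fun w => if oldb N parent m w then sv N parent w else -1)

theorem outerArr_length (N : Int) (parent : List Int) (m : Nat) :
    (outerArr N parent m).length = N.toNat := by
  rw [outerArr]; simp

def unsetCnt (N : Int) (parent : List Int) (r : Nat) (depth : List Int) : Nat :=
  ((List.range N.toNat).filter (fun w => belb N parent r w && (depth.getD w 0 == -1))).length


-- ---- basic chain lemmas ----

theorem iter_add (N : Int) (parent : List Int) (a b : Nat) :
    ∀ w, iterN N parent (a + b) w = (iterN N parent a w).bind (fun y => iterN N parent b y) := by
  induction a with
  | zero => intro w; simp [iterN]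
  | succ a ih =>
      intro w
      have h1 : a + 1 + b = (a + b) + 1 := by omega
      rw [h1]
      by_cases hg : 0 ≤ par parent w ∧ par parent w < N
      · simp only [iterN, if_pos hg]; exact ih _
      · simp only [iterN, if_neg hg]; rfl

theorem iter_prefix (N : Int) (parent : List Int) (i k w : Nat) (r : Nat) (hik : i ≤ k)
    (h : iterN N parent k w = some r) :
    ∃ y, iterN N parent i w = some y ∧ iterN N parent (k - i) y = some r := by
  have h2 : i + (k - i) = k := by omega
  rw [← h2, iter_add] at h
  cases hy : iterN N parent i w with
  | none => rw [hy] at h; exact absurd h (by simp)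
  | some y => rw [hy] at h; exact ⟨y, rfl, h⟩

theorem iter_step_lt (N : Int) (parent : List Int) :
    ∀ (k w y : Nat), iterN N parent (k + 1) w = some y → y < N.toNat := by
  intro k
  induction k with
  | zero =>
      intro w y h
      by_cases hg : 0 ≤ par parent w ∧ par parent w < N
      · simp only [iterN, if_pos hg] at h
        cases h; omega
      · simp only [iterN, if_neg hg] at h; cases h
  | succ k ih =>
      intro w y h
      by_cases hg : 0 ≤ par parent w ∧ par parent w < N
      · simp only [iterN, if_pos hg] at h
        exact ih _ _ h
      · simp only [iterN, if_neg hg] at h; cases h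

theorem root_stop (N : Int) (parent : List Int) (r : Nat) (hroot : par parent r = -1)
    (k : Nat) : iterN N parent (k + 1) r = none := by
  have hg : ¬ (0 ≤ par parent r ∧ par parent r < N) := by rw [hroot]; omega
  simp only [iterN, if_neg hg]

theorem chain_ne (N : Int) (parent : List Int) (r : Nat) (hroot : par parent r = -1)
    (k w : Nat) (h : iterN N parent k w = some r) :
    ∀ i j, i < j → j ≤ k → iterN N parent i w ≠ iterN N parent j w := by
  intro i j hij hjk heq
  obtain ⟨y, hy, hyr⟩ := iter_prefix N parent i k w r (by omega) h
  obtain ⟨z, hz, hzr⟩ := iter_prefix N parent j k w r hjk h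
  rw [heq, hz] at hy
  cases hy
  -- from y: (k - i) = (k - j) + (j - i) steps reach r; but also (k - j) steps reach r
  have hsplit : k - i = (k - j) + (j - i) := by omega
  rw [hsplit, iter_add, hzr] at hyr
  simp only [Option.bind_some] at hyr
  have : j - i = (j - i - 1) + 1 := by omega
  rw [this, root_stop N parent r hroot] at hyr
  cases hyr

theorem chain_bound (N : Int) (parent : List Int) (r : Nat) (hroot : par parent r = -1)
    (k w : Nat) (hw : w < N.toNat) (h : iterN N parent k w = some r) : k < N.toNat := by
  by_contra hk
  rw [Nat.not_lt] at hk
  -- the k+1 values iterN j w, j ≤ k, are distinct vertices < N.toNat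
  have hmaps : ∀ j ∈ Finset.range (k + 1),
      (iterN N parent j w).getD 0 ∈ Finset.range N.toNat := by
    intro j hj
    simp only [Finset.mem_range] at hj ⊢
    obtain ⟨y, hy, -⟩ := iter_prefix N parent j k w r (by omega) h
    rw [hy]
    cases j with
    | zero => simp only [iterN, Option.some.injEq] at hy; simp [← hy, hw]
    | succ j => simpa using iter_step_lt N parent j w y hy
  have hinj : Set.InjOn (fun j => (iterN N parent j w).getD 0) (Finset.range (k + 1)) := by
    intro i hi j hj hij
    simp only [Finset.coe_range, Set.mem_Iio] at hi hj
    by_contra hne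
    rcases Nat.lt_or_ge i j with hlt | hge
    · obtain ⟨y, hy, -⟩ := iter_prefix N parent i k w r (by omega) h
      obtain ⟨z, hz, -⟩ := iter_prefix N parent j k w r (by omega) h
      apply chain_ne N parent r hroot k w h i j hlt (by omega)
      rw [hy, hz]
      simp only [hy, hz, Option.getD_some] at hij
      rw [hij]
    · have hlt : j < i := by omega
      obtain ⟨y, hy, -⟩ := iter_prefix N parent i k w r (by omega) h
      obtain ⟨z, hz, -⟩ := iter_prefix N parent j k w r (by omega) h
      apply chain_ne N parent r hroot k w h j i hlt (by omega)
      rw [hy, hz]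
      simp only [hy, hz, Option.getD_some] at hij
      rw [hij]
  have hcard := Finset.card_le_card_of_injOn _ hmaps hinj
  simp only [Finset.card_range] at hcard
  omega


-- ---- casts and range bridging ----

theorem pyRange_cast (N : Int) :
    PySem.List.pyRange 0 N 1 = List.map (fun k : Nat => (k : Int)) (List.range N.toNat) := by
  rw [PySem.List.pyRange_one, Int.sub_zero]
  exact List.map_congr_left (fun a _ => by simp)

theorem pyGetD_par (parent : List Int) (w : Nat) :
    PySem.List.pyGetD parent (w : Int) 0 = par parent w := by
  simp [par]

theorem getD_set_self (l : List Int) (i : Nat) (v : Int) (h : i < l.length) :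
    (l.set i v).getD i 0 = v := by
  simp [List.getD_eq_getElem?_getD, h]

theorem getD_set_ne (l : List Int) (i j : Nat) (v : Int) (h : i ≠ j) :
    (l.set i v).getD j 0 = l.getD j 0 := by
  simp [List.getD_eq_getElem?_getD, List.getElem?_set_ne h]

theorem iter_fix (N : Int) (parent : List Int) (c : Nat) (hpc : par parent c = (c : Int))
    (hg : 0 ≤ par parent c ∧ par parent c < N) : ∀ k, iterN N parent k c = some c := by
  intro k
  induction k with
  | zero => rfl
  | succ k ih =>
      have ht : (par parent c).toNat = c := by rw [hpc]; omega
      simp only [iterN, if_pos hg, ht, ih]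

-- ---- dstep facts ----

theorem dstep_of_chain (N : Int) (parent : List Int) (r : Nat) (hroot : par parent r = -1) :
    ∀ (k w f : Nat), w < N.toNat → iterN N parent k w = some r → k + 2 ≤ f →
      dstep N parent f (w : Int) = some (k + 1) := by
  intro k
  induction k with
  | zero =>
      intro w f hw h hf
      simp only [iterN, Option.some.injEq] at h
      subst h
      obtain ⟨f', rfl⟩ : ∃ f', f = f' + 1 := ⟨f - 1, by omega⟩
      have h1 : ¬ ((w : Int) = -1) := by omega
      have h2 : (0 ≤ (w : Int) ∧ (w : Int) < N) := by omega
      simp only [dstep, if_neg h1, if_pos h2, pyGetD_par, hroot]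
      obtain ⟨f'', rfl⟩ : ∃ f'', f' = f'' + 1 := ⟨f' - 1, by omega⟩
      simp [dstep]
  | succ k ih =>
      intro w f hw h hf
      by_cases hg : 0 ≤ par parent w ∧ par parent w < N
      · simp only [iterN, if_pos hg] at h
        obtain ⟨f', rfl⟩ : ∃ f', f = f' + 1 := ⟨f - 1, by omega⟩
        have h1 : ¬ ((w : Int) = -1) := by omega
        have h2 : (0 ≤ (w : Int) ∧ (w : Int) < N) := by omega
        have hcast : par parent w = (((par parent w).toNat : Nat) : Int) := by omega
        simp only [dstep, if_neg h1, if_pos h2, pyGetD_par]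
        rw [hcast, ih (par parent w).toNat f' (by omega) h (by omega)]
        rfl
      · simp only [iterN, if_neg hg] at h
        cases h

theorem dstep_some_chain (N : Int) (parent : List Int) :
    ∀ (f : Nat) (w m : Nat), w < N.toNat → dstep N parent f (w : Int) = some m →
      ∃ k r, m = k + 1 ∧ iterN N parent k w = some r ∧ par parent r = -1 ∧ r < N.toNat := by
  intro f
  induction f with
  | zero => intro w m _ h; cases h
  | succ f ih =>
      intro w m hw h
      have h1 : ¬ ((w : Int) = -1) := by omega
      have h2 : (0 ≤ (w : Int) ∧ (w : Int) < N) := by omega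
      simp only [dstep, if_neg h1, if_pos h2, pyGetD_par] at h
      cases hd : dstep N parent f (par parent w) with
      | none => rw [hd] at h; cases h
      | some m' =>
          rw [hd] at h
          simp only [Option.map_some, Option.some.injEq] at h
          by_cases hpw : par parent w = -1
          · -- w is itself a root
            obtain ⟨f', rfl⟩ : ∃ f', f = f' + 1 := by
              cases f with
              | zero => rw [hpw] at hd; cases hd
              | succ f' => exact ⟨f', rfl⟩
            rw [hpw] at hd
            have hd0 : m' = 0 := by simp [dstep] at hd; omega
            exact ⟨0, w, by omega, rfl, hpw, hw⟩
          · have hg : 0 ≤ par parent w ∧ par parent w < N := by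
              by_contra hng
              have hnone : dstep N parent f (par parent w) = none := by
                cases f with
                | zero => rfl
                | succ f' => simp only [dstep, if_neg hpw, if_neg hng]
              rw [hnone] at hd; cases hd
            have hcast : par parent w = (((par parent w).toNat : Nat) : Int) := by omega
            rw [hcast] at hd
            obtain ⟨k, r, hm', hch, hr1, hr2⟩ := ih (par parent w).toNat m' (by omega) hd
            refine ⟨k + 1, r, by omega, ?_, hr1, hr2⟩
            simp only [iterN, if_pos hg, hch]

-- ---- belb facts ----

theorem bel_iff (N : Int) (parent : List Int) (r w : Nat) :
    belb N parent r w = true ↔ ∃ k, k ≤ N.toNat ∧ iterN N parent k w = some r := by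
  simp only [belb, List.any_eq_true, List.mem_range, beq_iff_eq]
  constructor
  · rintro ⟨k, hk, h⟩; exact ⟨k, by omega, h⟩
  · rintro ⟨k, hk, h⟩; exact ⟨k, by omega, h⟩

theorem bel_of_chain (N : Int) (parent : List Int) (r w k : Nat)
    (hroot : par parent r = -1) (hw : w < N.toNat) (h : iterN N parent k w = some r) :
    belb N parent r w = true :=
  (bel_iff N parent r w).2 ⟨k, by
    have := chain_bound N parent r hroot k w hw h; omega, h⟩

theorem bel_self (N : Int) (parent : List Int) (r : Nat) : belb N parent r r = true :=
  (bel_iff N parent r r).2 ⟨0, by omega, rfl⟩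

theorem bel_root_unique (N : Int) (parent : List Int) (r r' w : Nat)
    (hroot : par parent r = -1) (hroot' : par parent r' = -1)
    (h : belb N parent r w = true) (h' : belb N parent r' w = true) : r = r' := by
  obtain ⟨k, -, hk⟩ := (bel_iff N parent r w).1 h
  obtain ⟨k', -, hk'⟩ := (bel_iff N parent r' w).1 h'
  rcases Nat.le_total k k' with hle | hle
  · obtain ⟨y, hy, hrest⟩ := iter_prefix N parent k k' w r' hle hk'
    rw [hk] at hy
    cases hy
    cases hd : k' - k with
    | zero => rw [hd] at hrest; simp only [iterN, Option.some.injEq] at hrest; omega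
    | succ d => rw [hd, root_stop N parent r hroot d] at hrest; cases hrest
  · obtain ⟨y, hy, hrest⟩ := iter_prefix N parent k' k w r hle hk
    rw [hk'] at hy
    cases hy
    cases hd : k - k' with
    | zero => rw [hd] at hrest; simp only [iterN, Option.some.injEq] at hrest; omega
    | succ d => rw [hd, root_stop N parent r' hroot' d] at hrest; cases hrest

theorem bel_step (N : Int) (parent : List Int) (r w c : Nat)
    (hroot : par parent r = -1) (hw : w < N.toNat)
    (hg : 0 ≤ par parent w ∧ par parent w < N) (hpc : (par parent w).toNat = c)
    (hbc : belb N parent r c = true) : belb N parent r w = true := by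
  obtain ⟨k, -, hk⟩ := (bel_iff N parent r c).1 hbc
  apply bel_of_chain N parent r w (k + 1) hroot hw
  simp only [iterN, if_pos hg, hpc, hk]

theorem no_self_parent (N : Int) (parent : List Int) (r c : Nat)
    (hroot : par parent r = -1) (hbc : belb N parent r c = true) :
    par parent c ≠ (c : Int) := by
  intro hpc
  obtain ⟨k, -, hk⟩ := (bel_iff N parent r c).1 hbc
  by_cases hg : 0 ≤ par parent c ∧ par parent c < N
  · rw [iter_fix N parent c hpc hg k] at hk
    cases hk
    rw [hroot] at hpc
    omega
  · cases k with
    | zero =>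
        simp only [iterN, Option.some.injEq] at hk
        subst hk; rw [hroot] at hpc; omega
    | succ k => simp only [iterN, if_neg hg] at hk; cases hk

-- ---- sv facts ----

theorem sv_of_chain (N : Int) (parent : List Int) (r w k : Nat)
    (hroot : par parent r = -1) (hw : w < N.toNat) (h : iterN N parent k w = some r) :
    sv N parent w = (k : Int) := by
  have hb := chain_bound N parent r hroot k w hw h
  rw [sv, dstep_of_chain N parent r hroot k w (N.toNat + 1) hw h (by omega)]
  simp only [Option.elim_some]
  push_cast
  ring

theorem sv_root (N : Int) (parent : List Int) (r : Nat)
    (hroot : par parent r = -1) (hr : r < N.toNat) : sv N parent r = 0 :=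
  sv_of_chain N parent r r 0 hroot hr rfl

theorem sv_nonneg_of_bel (N : Int) (parent : List Int) (r w : Nat)
    (hroot : par parent r = -1) (hw : w < N.toNat) (h : belb N parent r w = true) :
    0 ≤ sv N parent w := by
  obtain ⟨k, -, hk⟩ := (bel_iff N parent r w).1 h
  rw [sv_of_chain N parent r w k hroot hw hk]
  omega

theorem sv_child (N : Int) (parent : List Int) (r w c : Nat)
    (hroot : par parent r = -1) (hw : w < N.toNat) (hc : c < N.toNat)
    (hg : 0 ≤ par parent w ∧ par parent w < N) (hpc : (par parent w).toNat = c)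
    (hbc : belb N parent r c = true) : sv N parent w = sv N parent c + 1 := by
  obtain ⟨k, -, hk⟩ := (bel_iff N parent r c).1 hbc
  have hw' : iterN N parent (k + 1) w = some r := by
    simp only [iterN, if_pos hg, hpc, hk]
  rw [sv_of_chain N parent r w (k + 1) hroot hw hw',
      sv_of_chain N parent r c k hroot hc hk]
  push_cast
  ring

theorem sv_eq_neg_one (N : Int) (parent : List Int) (w : Nat) (hw : w < N.toNat)
    (h : oldb N parent N.toNat w = false) : sv N parent w = -1 := by
  cases hd : dstep N parent (N.toNat + 1) (w : Int) with
  | none => rw [sv, hd]; rfl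
  | some m =>
      obtain ⟨k, r, -, hch, hr1, hr2⟩ := dstep_some_chain N parent (N.toNat + 1) w m hw hd
      have hb := bel_of_chain N parent r w k hr1 hw hch
      have : oldb N parent N.toNat w = true := by
        simp only [oldb, List.any_eq_true, List.mem_range]
        exact ⟨r, hr2, by simp [isRootb, hr1, hb]⟩
      rw [this] at h
      cases h

-- ---- port B equals the per-vertex value ----

theorem sv_cases (N : Int) (parent : List Int) (w : Nat) (hw : w < N.toNat) :
    sv N parent w = -1 ∨ 0 ≤ sv N parent w := by
  cases hd : dstep N parent (N.toNat + 1) (w : Int) with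
  | none => left; rw [sv, hd]; rfl
  | some m =>
      obtain ⟨k, r, hm, -, -, -⟩ := dstep_some_chain N parent (N.toNat + 1) w m hw hd
      right
      rw [sv, hd]
      simp only [Option.elim_some]
      omega

theorem sv_parent_rel (N : Int) (parent : List Int) (w : Nat) (hw : w < N.toNat)
    (hg : 0 ≤ par parent w ∧ par parent w < N) :
    sv N parent w =
      if 0 ≤ sv N parent ((par parent w).toNat) then sv N parent ((par parent w).toNat) + 1
      else -1 := by
  have hq : (par parent w).toNat < N.toNat := by omega
  have hqc : par parent w = (((par parent w).toNat : Nat) : Int) := by omega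
  have hne : ¬ ((w : Int) = -1) := by omega
  have hginw : 0 ≤ (w : Int) ∧ (w : Int) < N := by omega
  have hunf : dstep N parent (N.toNat + 1) (w : Int) =
      (dstep N parent N.toNat (((par parent w).toNat : Nat) : Int)).map (· + 1) := by
    simp only [dstep, if_neg hne, if_pos hginw, pyGetD_par]
    rw [← hqc]
  cases hdq : dstep N parent (N.toNat + 1) (((par parent w).toNat : Nat) : Int) with
  | none =>
      have hnone : dstep N parent N.toNat (((par parent w).toNat : Nat) : Int) = none := by
        cases hd0 : dstep N parent N.toNat (((par parent w).toNat : Nat) : Int) with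
        | none => rfl
        | some m =>
            obtain ⟨k, r, hm, hch, hr1, hr2⟩ :=
              dstep_some_chain N parent N.toNat ((par parent w).toNat) m hq hd0
            rw [dstep_of_chain N parent r hr1 k ((par parent w).toNat) (N.toNat + 1) hq hch
                (by have := chain_bound N parent r hr1 k ((par parent w).toNat) hq hch; omega)]
              at hdq
            cases hdq
      rw [sv, sv, hunf, hnone, hdq]
      simp
  | some m =>
      obtain ⟨k, r, hm, hch, hr1, hr2⟩ :=
        dstep_some_chain N parent (N.toNat + 1) ((par parent w).toNat) m hq hdq
      have hchw : iterN N parent (k + 1) w = some r := by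
        simp only [iterN, if_pos hg, hch]
      have hbw := chain_bound N parent r hr1 (k + 1) w hw hchw
      have hsome : dstep N parent N.toNat (((par parent w).toNat : Nat) : Int) = some (k + 1) :=
        dstep_of_chain N parent r hr1 k ((par parent w).toNat) N.toNat hq hch (by omega)
      rw [sv, sv, hunf, hsome, hdq]
      subst hm
      simp only [Option.map_some, Option.elim_some]
      rw [if_pos (by push_cast; omega)]
      push_cast
      ring

theorem sv_bad_parent (N : Int) (parent : List Int) (w : Nat) (hw : w < N.toNat)
    (hng : ¬ (0 ≤ par parent w ∧ par parent w < N)) (hne : par parent w ≠ -1) :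
    sv N parent w = -1 := by
  have hwne : ¬ ((w : Int) = -1) := by omega
  have hginw : 0 ≤ (w : Int) ∧ (w : Int) < N := by omega
  have hnone : dstep N parent N.toNat (par parent w) = none := by
    cases hN : N.toNat with
    | zero => rfl
    | succ n' => simp only [dstep, if_neg hne, if_neg hng]
  rw [sv]
  simp only [dstep, if_neg hwne, if_pos hginw, pyGetD_par, hnone]
  rfl

-- the walk relation: starting at vertex s, the walk has visited exactly the vertices in ps
-- (in order) and its pointer is now u
def Link (N : Int) (parent : List Int) : Nat → List Nat → Int → Prop
  | s, [], u => u = (s : Int)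
  | s, p :: ps, u => p = s ∧ s < N.toNat ∧
      (match ps with
       | [] => u = par parent s
       | _ :: _ => (0 ≤ par parent s ∧ par parent s < N) ∧
           Link N parent (par parent s).toNat ps u)

theorem link_iter_end (N : Int) (parent : List Int) :
    ∀ (ps : List Nat) (s : Nat) (u : Int), Link N parent s ps u → 0 ≤ u ∧ u < N →
      iterN N parent ps.length s = some u.toNat := by
  intro ps
  induction ps with
  | nil =>
      intro s u hl _
      rw [hl]
      simp [iterN]
  | cons q ps ih =>
      intro s u hl hu
      obtain ⟨hq, hs, hrest⟩ := hl
      cases ps with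
      | nil =>
          have hpar : par parent s = u := hrest.symm ▸ rfl
          simp only [List.length_cons, List.length_nil]
          have hg : 0 ≤ par parent s ∧ par parent s < N := by rw [hpar]; exact hu
          simp only [iterN, hpar]
          rw [if_pos hu]
      | cons q2 ps2 =>
          obtain ⟨hg, hlink⟩ := hrest
          simp only [List.length_cons]
          simp only [iterN, if_pos hg]
          exact ih _ _ hlink hu

theorem link_snoc (N : Int) (parent : List Int) :
    ∀ (ps : List Nat) (s : Nat) (u : Int) (q : Nat), Link N parent s ps u → u = (q : Int) →
      q < N.toNat → Link N parent s (ps ++ [q]) (par parent q) := by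
  intro ps
  induction ps with
  | nil =>
      intro s u q hl hu hq
      have hsq : s = q := by
        rw [hl] at hu
        exact_mod_cast hu
      subst hsq
      exact ⟨rfl, hq, rfl⟩
  | cons p ps ih =>
      intro s u q hl hu hq
      obtain ⟨hp, hs, hrest⟩ := hl
      cases ps with
      | nil =>
          have hpar : par parent s = u := hrest.symm ▸ rfl
          refine ⟨hp, hs, ?_⟩
          have hg : 0 ≤ par parent s ∧ par parent s < N := by
            rw [hpar, hu]
            constructor
            · omega
            · omega
          refine ⟨hg, ?_⟩
          have : (par parent s).toNat = q := by rw [hpar, hu]; omega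
          rw [this]
          exact ⟨rfl, hq, rfl⟩
      | cons q2 ps2 =>
          obtain ⟨hg, hlink⟩ := hrest
          exact ⟨hp, hs, hg, ih _ _ q hlink hu hq⟩

theorem walk_spec (N : Int) (parent D : List Int) (v : Nat) :
    ∀ (fuel : Nat) (ps : List Nat) (u : Int),
      fuel + ps.length = N.toNat + 2 →
      Link N parent v ps u →
      (∀ p ∈ ps, D.getD p 0 = -2) →
      ∃ (ps' : List Nat) (u' : Int),
        bWalk N parent D fuel (List.map (fun k : Nat => (k : Int)) ps) u =
          (List.map (fun k : Nat => (k : Int)) ps', u') ∧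
        Link N parent v ps' u' ∧
        (∀ p ∈ ps', D.getD p 0 = -2) ∧
        ¬ (0 ≤ u' ∧ u' < N ∧ PySem.List.pyGetD D u' 0 = -2 ∧ ((ps'.length : Nat) : Int) ≤ N) := by
  intro fuel
  induction fuel with
  | zero =>
      intro ps u hfuel hlink hunk
      refine ⟨ps, u, rfl, hlink, hunk, ?_⟩
      rintro ⟨h1, h2, -, h4⟩
      have hN : N = (N.toNat : Int) := by omega
      omega
  | succ fuel ih =>
      intro ps u hfuel hlink hunk
      by_cases hc : 0 ≤ u ∧ u < N ∧ PySem.List.pyGetD D u 0 = -2 ∧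
          (((List.map (fun k : Nat => (k : Int)) ps).length : Int) ≤ N)
      · obtain ⟨hc1, hc2, hc3, hc4⟩ := hc
        have hq : u.toNat < N.toNat := by omega
        have huq : u = ((u.toNat : Nat) : Int) := by omega
        have hgetu : PySem.List.pyGetD parent u 0 = par parent u.toNat := by
          conv_lhs => rw [huq]
          rw [pyGetD_par]
        have hpath : List.map (fun k : Nat => (k : Int)) ps ++ [u] =
            List.map (fun k : Nat => (k : Int)) (ps ++ [u.toNat]) := by
          rw [List.map_append, List.map_cons, List.map_nil, ← huq]
        have hstep : bWalk N parent D (fuel + 1) (List.map (fun k : Nat => (k : Int)) ps) u =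
            bWalk N parent D fuel (List.map (fun k : Nat => (k : Int)) (ps ++ [u.toNat]))
              (PySem.List.pyGetD parent u 0) := by
          rw [bWalk, if_pos ⟨hc1, hc2, hc3, hc4⟩, hpath]
        rw [hstep, hgetu]
        apply ih
        · rw [List.length_append, List.length_cons, List.length_nil]; omega
        · exact link_snoc N parent ps v u u.toNat hlink huq hq
        · intro p hp
          rcases List.mem_append.1 hp with h | h
          · exact hunk p h
          · rw [List.mem_singleton] at h
            subst h
            rw [huq, pyGetD_par] at hc3
            exact hc3
      · refine ⟨ps, u, ?_, hlink, hunk, ?_⟩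
        · rw [bWalk, if_neg (by
            intro hcc
            exact hc ⟨hcc.1, hcc.2.1, hcc.2.2.1, hcc.2.2.2⟩)]
        · intro hcc
          apply hc
          rw [List.length_map]
          exact ⟨hcc.1, hcc.2.1, hcc.2.2.1, hcc.2.2.2⟩

def wbPtr (ps : List Nat) (u : Int) : Int :=
  match ps with
  | [] => u
  | p :: _ => (p : Int)

theorem wb_spec (N : Int) (parent : List Int) :
    ∀ (ps : List Nat) (s : Nat) (u : Int) (D : List Int) (base : Int),
      Link N parent s ps u →
      D.length = N.toNat →
      (∀ w, w < N.toNat → par parent w = u →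
        sv N parent w = (if 0 ≤ base then base else -1)) →
      (ps.foldr
          (fun p st => if 0 ≤ st.2 then (st.1.set p st.2, st.2 + 1)
            else (st.1.set p (-1), st.2)) (D, base)).1.length = N.toNat ∧
      (∀ j, j < N.toNat →
        (ps.foldr
          (fun p st => if 0 ≤ st.2 then (st.1.set p st.2, st.2 + 1)
            else (st.1.set p (-1), st.2)) (D, base)).1.getD j 0 =
          if j ∈ ps then sv N parent j else D.getD j 0) ∧
      (∀ w, w < N.toNat →
        par parent w = wbPtr ps u →
        sv N parent w =
          (if 0 ≤ (ps.foldr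
            (fun p st => if 0 ≤ st.2 then (st.1.set p st.2, st.2 + 1)
              else (st.1.set p (-1), st.2)) (D, base)).2
           then (ps.foldr
            (fun p st => if 0 ≤ st.2 then (st.1.set p st.2, st.2 + 1)
              else (st.1.set p (-1), st.2)) (D, base)).2
           else -1)) := by
  intro ps
  induction ps with
  | nil =>
      intro s u D base hlink hlen H
      exact ⟨hlen, fun j hj => by simp, H⟩
  | cons p ps ih =>
      intro s u D base hlink hlen H
      obtain ⟨hp, hs, hrest⟩ := hlink
      -- the tail is processed first (foldr); get its description
      have htail :
          ∃ st' : List Int × Int,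
            st' = (ps.foldr
              (fun p st => if 0 ≤ st.2 then (st.1.set p st.2, st.2 + 1)
                else (st.1.set p (-1), st.2)) (D, base)) ∧
            st'.1.length = N.toNat ∧
            (∀ j, j < N.toNat → st'.1.getD j 0 = if j ∈ ps then sv N parent j else D.getD j 0) ∧
            (∀ w, w < N.toNat →
              par parent w = wbPtr ps u →
              sv N parent w = (if 0 ≤ st'.2 then st'.2 else -1)) := by
        cases ps with
        | nil => exact ⟨(D, base), rfl, hlen, fun j hj => by simp, H⟩
        | cons q ps2 =>
            obtain ⟨hg, hlink2⟩ := hrest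
            obtain ⟨h1, h2, h3⟩ := ih (par parent s).toNat u D base hlink2 hlen H
            exact ⟨_, rfl, h1, h2, h3⟩
      obtain ⟨st', hst', hlen', hpoint', H'⟩ := htail
      -- p's parent pointer is the head of the remaining state
      have hparp : par parent p = wbPtr ps u := by
        cases ps with
        | nil => rw [hp, wbPtr]; exact hrest.symm
        | cons q ps2 =>
            obtain ⟨hg, hlink2⟩ := hrest
            have hq : q = (par parent s).toNat := hlink2.1
            rw [hp, wbPtr, hq]
            omega
      have hsvp : sv N parent p = (if 0 ≤ st'.2 then st'.2 else -1) :=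
        H' p (hp ▸ hs) hparp
      have hfold : ((p :: ps).foldr
          (fun p st => if 0 ≤ st.2 then (st.1.set p st.2, st.2 + 1)
            else (st.1.set p (-1), st.2)) (D, base)) =
          (if 0 ≤ st'.2 then (st'.1.set p st'.2, st'.2 + 1)
            else (st'.1.set p (-1), st'.2)) := by
        rw [List.foldr_cons, ← hst']
      have hplen : p < st'.1.length := by rw [hlen']; exact hp ▸ hs
      refine ⟨?_, ?_, ?_⟩
      · rw [hfold]
        by_cases hb : (0:Int) ≤ st'.2
        · rw [if_pos hb]; simpa using hlen'
        · rw [if_neg hb]; simpa using hlen'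
      · intro j hj
        rw [hfold]
        by_cases hjp : j = p
        · subst hjp
          rw [if_pos (List.mem_cons_self)]
          by_cases hb : (0:Int) ≤ st'.2
          · rw [if_pos hb]
            simp only
            rw [getD_set_self _ _ _ hplen, hsvp, if_pos hb]
          · rw [if_neg hb]
            simp only
            rw [getD_set_self _ _ _ hplen, hsvp, if_neg hb]
        · have hstep : (if 0 ≤ st'.2 then (st'.1.set p st'.2, st'.2 + 1)
              else (st'.1.set p (-1), st'.2)).1.getD j 0 = st'.1.getD j 0 := by
            by_cases hb : (0:Int) ≤ st'.2
            · rw [if_pos hb]; exact getD_set_ne _ p j _ (fun h => hjp h.symm)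
            · rw [if_neg hb]; exact getD_set_ne _ p j _ (fun h => hjp h.symm)
          rw [hstep, hpoint' j hj]
          by_cases hjm : j ∈ ps
          · rw [if_pos hjm, if_pos (List.mem_cons_of_mem _ hjm)]
          · rw [if_neg hjm, if_neg (by
              intro hmem
              rcases List.mem_cons.1 hmem with h | h
              · exact hjp h
              · exact hjm h)]
      · intro w hw hpar
        rw [show wbPtr (p :: ps) u = ((p : Nat) : Int) from rfl] at hpar
        rw [hfold]
        have hgw : 0 ≤ par parent w ∧ par parent w < N := by
          rw [hpar]
          constructor
          · omega
          · have : p < N.toNat := hp ▸ hs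
            omega
        have htn : (par parent w).toNat = p := by rw [hpar]; omega
        have hrel := sv_parent_rel N parent w hw hgw
        rw [htn] at hrel
        by_cases hb : (0:Int) ≤ st'.2
        · rw [if_pos hb]
          simp only
          rw [if_pos (by omega)]
          have hsvp' : sv N parent p = st'.2 := by rw [hsvp, if_pos hb]
          rw [hrel, hsvp', if_pos hb]
        · rw [if_neg hb]
          simp only
          rw [if_neg hb]
          have hsvp' : sv N parent p = -1 := by rw [hsvp, if_neg hb]
          rw [hrel, hsvp', if_neg (by omega)]

-- one iteration of B's outer loop, as a named function (definitionally the fold body)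
def bStep (N : Int) (parent depth : List Int) (v : Int) : List Int :=
  let pu := bWalk N parent depth (N.toNat + 2) [] v
  let base : Int :=
    if pu.2 = -1 then 0
    else if 0 ≤ pu.2 ∧ pu.2 < N ∧ 0 ≤ PySem.List.pyGetD depth pu.2 0 then
      PySem.List.pyGetD depth pu.2 0 + 1
    else -1
  (pu.1.reverse.foldl
    (fun st node =>
      if 0 ≤ st.2 then (PySem.List.pySetD st.1 node st.2, st.2 + 1)
      else (PySem.List.pySetD st.1 node (-1), st.2)) (depth, base)).1

theorem bAssign_eq (ps : List Nat) (D : List Int) (base : Int) :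
    ((List.map (fun k : Nat => (k : Int)) ps).reverse.foldl
      (fun st node =>
        if 0 ≤ st.2 then (PySem.List.pySetD st.1 node st.2, st.2 + 1)
        else (PySem.List.pySetD st.1 node (-1), st.2)) (D, base)) =
    ps.foldr
      (fun p st => if 0 ≤ st.2 then (st.1.set p st.2, st.2 + 1)
        else (st.1.set p (-1), st.2)) (D, base) := by
  rw [List.foldl_reverse, List.foldr_map]
  induction ps with
  | nil => rfl
  | cons p ps ih => simp only [List.foldr_cons, ih]; simp

theorem step_spec (N : Int) (parent D : List Int) (v : Nat) (hv : v < N.toNat)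
    (hlen : D.length = N.toNat)
    (hdi : ∀ j, j < N.toNat → D.getD j 0 = -2 ∨ D.getD j 0 = sv N parent j) :
    (bStep N parent D (v : Int)).length = N.toNat ∧
    (∀ j, j < N.toNat →
      (bStep N parent D (v : Int)).getD j 0 = -2 ∨
      (bStep N parent D (v : Int)).getD j 0 = sv N parent j) ∧
    (bStep N parent D (v : Int)).getD v 0 = sv N parent v ∧
    (∀ j, j < N.toNat → D.getD j 0 = sv N parent j →
      (bStep N parent D (v : Int)).getD j 0 = sv N parent j) := by
  have hN : 0 < N := by omega
  obtain ⟨ps', u', heq, hlink, hunk, hexit⟩ :=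
    walk_spec N parent D v (N.toNat + 2) [] (v : Int) (by simp) rfl (by intro p hp; cases hp)
  have hbw : bWalk N parent D (N.toNat + 2) [] (v : Int) =
      (List.map (fun k : Nat => (k : Int)) ps', u') := by simpa using heq
  have hH : ∀ w, w < N.toNat → par parent w = u' →
      sv N parent w =
        (if 0 ≤ (if u' = -1 then (0 : Int)
            else if 0 ≤ u' ∧ u' < N ∧ 0 ≤ PySem.List.pyGetD D u' 0 then
              PySem.List.pyGetD D u' 0 + 1
            else -1)
         then (if u' = -1 then (0 : Int)
            else if 0 ≤ u' ∧ u' < N ∧ 0 ≤ PySem.List.pyGetD D u' 0 then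
              PySem.List.pyGetD D u' 0 + 1
            else -1)
         else -1) := by
    by_cases hu1 : u' = -1
    · intro w hw hpw
      rw [if_pos hu1]
      rw [if_pos (by omega : (0:Int) ≤ 0)]
      exact sv_root N parent w (hpw.trans hu1) hw
    · by_cases hu2 : 0 ≤ u' ∧ u' < N
      · have hq0 : u'.toNat < N.toNat := by omega
        have hu'c : u' = ((u'.toNat : Nat) : Int) := by omega
        have hDq : PySem.List.pyGetD D u' 0 = D.getD u'.toNat 0 := by
          conv_lhs => rw [hu'c]
          rw [pyGetD_par]
          rfl
        by_cases hqv : D.getD u'.toNat 0 = -2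
        · -- the walk stopped because the path got longer than N: rootless chain
          have hlen' : ¬ ((ps'.length : Int) ≤ N) := fun hle =>
            hexit ⟨hu2.1, hu2.2, by rw [hDq]; exact hqv, hle⟩
          have hiter := link_iter_end N parent ps' v u' hlink hu2
          have hsvq : sv N parent u'.toNat = -1 := by
            rcases sv_cases N parent u'.toNat hq0 with h | h
            · exact h
            · exfalso
              cases hd : dstep N parent (N.toNat + 1) ((u'.toNat : Nat) : Int) with
              | none => rw [sv, hd] at h; simp at h
              | some m =>
                  obtain ⟨k, r, hm, hch, hr1, hr2⟩ :=
                    dstep_some_chain N parent (N.toNat + 1) u'.toNat m hq0 hd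
                  have hcomb : iterN N parent (ps'.length + k) v = some r := by
                    rw [iter_add, hiter]
                    simpa using hch
                  have := chain_bound N parent r hr1 (ps'.length + k) v hv hcomb
                  omega
          intro w hw hpw
          have hbase' : (if u' = -1 then (0 : Int)
              else if 0 ≤ u' ∧ u' < N ∧ 0 ≤ PySem.List.pyGetD D u' 0 then
                PySem.List.pyGetD D u' 0 + 1
              else -1) = -1 := by
            rw [if_neg hu1, if_neg (by rintro ⟨-, -, h3⟩; rw [hDq, hqv] at h3; omega)]
          rw [hbase', if_neg (by omega)]
          have hrel := sv_parent_rel N parent w hw (by rw [hpw]; exact hu2)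
          rw [show (par parent w).toNat = u'.toNat from by rw [hpw]] at hrel
          rw [hrel, hsvq, if_neg (by omega)]
        · have hmemo : D.getD u'.toNat 0 = sv N parent u'.toNat := by
            rcases hdi u'.toNat hq0 with h | h
            · exact absurd h hqv
            · exact h
          intro w hw hpw
          have hrel := sv_parent_rel N parent w hw (by rw [hpw]; exact hu2)
          rw [show (par parent w).toNat = u'.toNat from by rw [hpw]] at hrel
          rcases sv_cases N parent u'.toNat hq0 with hneg | hpos
          · have hbase' : (if u' = -1 then (0 : Int)
                else if 0 ≤ u' ∧ u' < N ∧ 0 ≤ PySem.List.pyGetD D u' 0 then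
                  PySem.List.pyGetD D u' 0 + 1
                else -1) = -1 := by
              rw [if_neg hu1, if_neg (by rintro ⟨-, -, h3⟩; rw [hDq, hmemo, hneg] at h3; omega)]
            rw [hbase', if_neg (by omega), hrel, hneg, if_neg (by omega)]
          · have hbase' : (if u' = -1 then (0 : Int)
                else if 0 ≤ u' ∧ u' < N ∧ 0 ≤ PySem.List.pyGetD D u' 0 then
                  PySem.List.pyGetD D u' 0 + 1
                else -1) = sv N parent u'.toNat + 1 := by
              rw [if_neg hu1, if_pos ⟨hu2.1, hu2.2, by rw [hDq, hmemo]; exact hpos⟩, hDq, hmemo]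
            rw [hbase', if_pos (by omega), hrel, if_pos hpos]
      · intro w hw hpw
        have hbase' : (if u' = -1 then (0 : Int)
            else if 0 ≤ u' ∧ u' < N ∧ 0 ≤ PySem.List.pyGetD D u' 0 then
              PySem.List.pyGetD D u' 0 + 1
            else -1) = -1 := by
          rw [if_neg hu1, if_neg (by rintro ⟨h1, h2, -⟩; exact hu2 ⟨h1, h2⟩)]
        rw [hbase', if_neg (by omega)]
        exact sv_bad_parent N parent w hw (by rw [hpw]; exact hu2) (by rw [hpw]; exact hu1)
  obtain ⟨hwlen, hwpoint, -⟩ :=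
    wb_spec N parent ps' v u' D
      (if u' = -1 then (0 : Int)
        else if 0 ≤ u' ∧ u' < N ∧ 0 ≤ PySem.List.pyGetD D u' 0 then
          PySem.List.pyGetD D u' 0 + 1
        else -1)
      hlink hlen hH
  have hbsr : bStep N parent D (v : Int) =
      (ps'.foldr
        (fun p st => if 0 ≤ st.2 then (st.1.set p st.2, st.2 + 1)
          else (st.1.set p (-1), st.2))
        (D, (if u' = -1 then (0 : Int)
          else if 0 ≤ u' ∧ u' < N ∧ 0 ≤ PySem.List.pyGetD D u' 0 then
            PySem.List.pyGetD D u' 0 + 1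
          else -1))).1 := by
    rw [show bStep N parent D (v : Int) =
        ((bWalk N parent D (N.toNat + 2) [] (v : Int)).1.reverse.foldl
          (fun st node =>
            if 0 ≤ st.2 then (PySem.List.pySetD st.1 node st.2, st.2 + 1)
            else (PySem.List.pySetD st.1 node (-1), st.2))
          (D, (if (bWalk N parent D (N.toNat + 2) [] (v : Int)).2 = -1 then (0 : Int)
            else if 0 ≤ (bWalk N parent D (N.toNat + 2) [] (v : Int)).2 ∧
                (bWalk N parent D (N.toNat + 2) [] (v : Int)).2 < N ∧
                0 ≤ PySem.List.pyGetD D (bWalk N parent D (N.toNat + 2) [] (v : Int)).2 0 then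
              PySem.List.pyGetD D (bWalk N parent D (N.toNat + 2) [] (v : Int)).2 0 + 1
            else -1))).1 from rfl]
    rw [hbw]
    exact congrArg Prod.fst (bAssign_eq ps' D _)
  have hvin : D.getD v 0 = -2 → v ∈ ps' := by
    intro hdv
    cases ps' with
    | nil =>
        exfalso
        have hu'v : u' = (v : Int) := hlink
        apply hexit
        rw [hu'v]
        refine ⟨by omega, by omega, ?_, by simp; omega⟩
        rw [pyGetD_par]
        exact hdv
    | cons p ps2 =>
        have hpv : p = v := hlink.1
        subst hpv
        exact List.mem_cons_self
  refine ⟨?_, ?_, ?_, ?_⟩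
  · rw [hbsr]; exact hwlen
  · intro j hj
    rw [hbsr, hwpoint j hj]
    by_cases hjm : j ∈ ps'
    · rw [if_pos hjm]; right; rfl
    · rw [if_neg hjm]; exact hdi j hj
  · rw [hbsr, hwpoint v hv]
    rcases hdi v hv with h | h
    · rw [if_pos (hvin h)]
    · by_cases hvm : v ∈ ps'
      · rw [if_pos hvm]
      · rw [if_neg hvm]; exact h
  · intro j hj hdj
    rw [hbsr, hwpoint j hj]
    by_cases hjm : j ∈ ps'
    · rw [if_pos hjm]
    · rw [if_neg hjm]; exact hdj

theorem fold_oinv (N : Int) (parent : List Int) :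
    ∀ (vs : List Nat) (D : List Int), (∀ x ∈ vs, x < N.toNat) →
      D.length = N.toNat →
      (∀ j, j < N.toNat → D.getD j 0 = -2 ∨ D.getD j 0 = sv N parent j) →
      ((List.map (fun k : Nat => (k : Int)) vs).foldl (fun d x => bStep N parent d x) D).length
        = N.toNat ∧
      (∀ j, j < N.toNat → D.getD j 0 = sv N parent j →
        ((List.map (fun k : Nat => (k : Int)) vs).foldl (fun d x => bStep N parent d x) D).getD j 0
          = sv N parent j) ∧
      (∀ x ∈ vs,
        ((List.map (fun k : Nat => (k : Int)) vs).foldl (fun d x => bStep N parent d x) D).getD x 0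
          = sv N parent x) := by
  intro vs
  induction vs with
  | nil =>
      intro D _ hlen _
      exact ⟨hlen, fun j _ h => h, fun x hx => absurd hx (List.not_mem_nil)⟩
  | cons x vs ih =>
      intro D hmem hlen hdi
      have hx : x < N.toNat := hmem x List.mem_cons_self
      obtain ⟨h1, h2, h3, h4⟩ := step_spec N parent D x hx hlen hdi
      obtain ⟨ih1, ih2, ih3⟩ := ih (bStep N parent D (x : Int)) (fun y hy => hmem y (List.mem_cons_of_mem _ hy)) h1 h2
      rw [List.map_cons, List.foldl_cons]
      refine ⟨ih1, ?_, ?_⟩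
      · intro j hj hdj
        exact ih2 j hj (h4 j hj hdj)
      · intro y hy
        rcases List.mem_cons.1 hy with h | h
        · subst h
          exact ih2 y hx h3
        · exact ih3 y h

theorem b_eq_outer (N : Int) (parent : List Int) :
    compute_depth_all_alt N parent = outerArr N parent N.toNat := by
  have halt : compute_depth_all_alt N parent =
      (PySem.List.pyRange 0 N 1).foldl (fun d x => bStep N parent d x)
        (List.replicate N.toNat (-2)) := rfl
  rw [halt, pyRange_cast]
  obtain ⟨h1, -, h3⟩ := fold_oinv N parent (List.range N.toNat) (List.replicate N.toNat (-2))
    (by intro x hx; exact List.mem_range.1 hx)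
    (by simp)
    (by intro j hj; left; simp [List.getD_eq_getElem?_getD, hj])
  apply List.ext_getElem
  · rw [h1, outerArr_length]
  · intro i hi1 hi2
    have hi : i < N.toNat := by rw [outerArr_length] at hi2; exact hi2
    have hfin := h3 i (List.mem_range.2 hi)
    have hgd : ((List.map (fun k : Nat => (k : Int)) (List.range N.toNat)).foldl
        (fun d x => bStep N parent d x) (List.replicate N.toNat (-2)))[i]'hi1 =
        ((List.map (fun k : Nat => (k : Int)) (List.range N.toNat)).foldl
        (fun d x => bStep N parent d x) (List.replicate N.toNat (-2))).getD i 0 := by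
      rw [List.getD_eq_getElem?_getD, List.getElem?_eq_getElem hi1]
      rfl
    rw [hgd, hfin]
    have houter : (outerArr N parent N.toNat)[i]'hi2 =
        if oldb N parent N.toNat i then sv N parent i else -1 := by
      simp [outerArr]
    rw [houter]
    by_cases hb : oldb N parent N.toNat i = true
    · rw [if_pos hb]
    · rw [if_neg hb]
      rw [sv_eq_neg_one N parent i hi (by revert hb; cases oldb N parent N.toNat i <;> simp)]

-- the BFS loop invariant for the run rooted at r
structure BInv (N : Int) (parent : List Int) (r : Nat) (depth queue : List Int) : Prop where
  len : depth.length = N.toNat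
  notb : ∀ w, w < N.toNat → ¬ belb N parent r w = true →
    depth.getD w 0 = (if oldb N parent r w then sv N parent w else -1)
  belset : ∀ w, w < N.toNat → belb N parent r w = true →
    depth.getD w 0 = sv N parent w ∨ depth.getD w 0 = -1
  que : ∀ x ∈ queue, ∃ w : Nat, x = (w : Int) ∧ w < N.toNat ∧ belb N parent r w = true ∧
    depth.getD w 0 = sv N parent w
  anc : ∀ w, w < N.toNat → belb N parent r w = true → depth.getD w 0 = -1 →
    ∃ a : Nat, (a : Int) ∈ queue ∧ ∃ k, iterN N parent (k + 1) w = some a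
  nd : queue.Nodup
  childunset : ∀ x ∈ queue, ∀ c, c < N.toNat → par parent c = x → depth.getD c 0 = -1
  parset : ∀ y, y < N.toNat → belb N parent r y = true → depth.getD y 0 ≠ -1 → y ≠ r →
    ((par parent y) ∉ queue ∧ depth.getD (par parent y).toNat 0 ≠ -1)


-- ---- characterisation of the inner 'for w in range(N)' pass ----

def aStep (parent : List Int) (cur : Int) (st : List Int × List Int) (w : Int) :
    List Int × List Int :=
  if PySem.List.pyGetD parent w 0 = cur then
    (PySem.List.pySetD st.1 w (PySem.List.pyGetD st.1 cur 0 + 1), st.2 ++ [w])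
  else st

theorem aInner_eq (N : Int) (parent : List Int) (cur : Int) (st : List Int × List Int) :
    aInner N parent cur st =
      (List.map (fun k : Nat => (k : Int)) (List.range N.toNat)).foldl (aStep parent cur) st := by
  rw [aInner, pyRange_cast]; rfl

theorem countP_split {α : Type} (l : List α) (p q : α → Bool) :
    l.countP p = l.countP (fun a => p a && q a) + l.countP (fun a => p a && !q a) := by
  induction l with
  | nil => rfl
  | cons x t ih =>
      by_cases hp : p x <;> by_cases hq : q x <;>
        simp [hp, hq, ih] <;> omega

theorem fold_spec (parent : List Int) (cur : Int) (c : Nat)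
    (hcur : cur = (c : Int)) (hpc : par parent c ≠ cur) :
    ∀ (L : List Nat) (d q : List Int), (∀ w ∈ L, w < d.length) →
      ((List.map (fun k : Nat => (k : Int)) L).foldl (aStep parent cur) (d, q)).1.length = d.length ∧
      (∀ j : Nat, ((List.map (fun k : Nat => (k : Int)) L).foldl (aStep parent cur) (d, q)).1.getD j 0 =
        if j ∈ L ∧ par parent j = cur then d.getD c 0 + 1 else d.getD j 0) ∧
      ((List.map (fun k : Nat => (k : Int)) L).foldl (aStep parent cur) (d, q)).2 =
        q ++ List.map (fun k : Nat => (k : Int)) (L.filter (fun w => par parent w == cur)) := by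
  intro L
  induction L with
  | nil =>
      intro d q _
      refine ⟨rfl, ?_, by simp⟩
      intro j
      simp
  | cons w L ih =>
      intro d q hmem
      have hwlen : w < d.length := hmem w (List.mem_cons_self)
      by_cases hw : par parent w = cur
      · have hstep : aStep parent cur (d, q) (w : Int) =
            (d.set w (d.getD c 0 + 1), q ++ [(w : Int)]) := by
          rw [aStep]
          rw [if_pos (by rw [pyGetD_par]; exact hw)]
          rw [hcur]
          simp
        have hcne : c ≠ w := fun h => hpc (h ▸ hw)
        have hgdc : (d.set w (d.getD c 0 + 1)).getD c 0 = d.getD c 0 :=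
          getD_set_ne d w c _ (fun h => hcne h.symm)
        obtain ⟨ihl, ihp, ihq⟩ := ih (d.set w (d.getD c 0 + 1)) (q ++ [(w : Int)])
          (by intro w' hw'; rw [List.length_set]; exact hmem w' (List.mem_cons_of_mem _ hw'))
        rw [List.map_cons, List.foldl_cons, hstep]
        refine ⟨by rw [ihl, List.length_set], ?_, ?_⟩
        · intro j
          rw [ihp j, hgdc]
          by_cases hj1 : j ∈ L ∧ par parent j = cur
          · rw [if_pos hj1, if_pos ⟨List.mem_cons_of_mem _ hj1.1, hj1.2⟩]
          · rw [if_neg hj1]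
            by_cases hj2 : j = w
            · subst hj2
              rw [if_pos ⟨List.mem_cons_self, hw⟩]
              exact getD_set_self d j _ hwlen
            · rw [if_neg (by
                  rintro ⟨hjm, hjp⟩
                  rcases List.mem_cons.1 hjm with h | h
                  · exact hj2 h
                  · exact hj1 ⟨h, hjp⟩)]
              exact getD_set_ne d w j _ (fun h => hj2 h.symm)
        · rw [ihq, List.filter_cons_of_pos (by simp [hw]), List.map_cons, List.append_assoc]
          rfl
      · have hstep : aStep parent cur (d, q) (w : Int) = (d, q) := by
          rw [aStep, if_neg (by rw [pyGetD_par]; exact hw)]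
        obtain ⟨ihl, ihp, ihq⟩ := ih d q (fun w' hw' => hmem w' (List.mem_cons_of_mem _ hw'))
        rw [List.map_cons, List.foldl_cons, hstep]
        refine ⟨ihl, ?_, ?_⟩
        · intro j
          rw [ihp j]
          by_cases hj1 : j ∈ L ∧ par parent j = cur
          · rw [if_pos hj1, if_pos ⟨List.mem_cons_of_mem _ hj1.1, hj1.2⟩]
          · rw [if_neg hj1, if_neg (by
              rintro ⟨hjm, hjp⟩
              rcases List.mem_cons.1 hjm with h | h
              · subst h; exact hw hjp
              · exact hj1 ⟨h, hjp⟩)]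
        · rw [ihq, List.filter_cons_of_neg (by simp [hw])]

theorem bfs_done (N : Int) (parent : List Int) (r : Nat) (depth : List Int)
    (hInv : BInv N parent r depth []) (fuel : Nat) :
    aBFS N parent fuel depth [] =
      (List.range N.toNat).map
        (fun w => if belb N parent r w then sv N parent w else depth.getD w 0) := by
  have h0 : aBFS N parent fuel depth [] = depth := by cases fuel <;> rfl
  rw [h0]
  apply List.ext_getElem
  · simp [hInv.len]
  · intro i h1 h2
    have hi : i < N.toNat := by simpa [hInv.len] using h1
    have hmap : ((List.range N.toNat).map
        (fun w => if belb N parent r w then sv N parent w else depth.getD w 0))[i]'h2 =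
        (if belb N parent r i then sv N parent i else depth.getD i 0) := by simp
    rw [hmap]
    have hgd : depth.getD i 0 = depth[i]'h1 := by
      rw [List.getD_eq_getElem?_getD, List.getElem?_eq_getElem h1]; rfl
    by_cases hb : belb N parent r i = true
    · rw [if_pos hb]
      rcases hInv.belset i hi hb with h | h
      · rw [← hgd, h]
      · exfalso
        obtain ⟨a, ha, -⟩ := hInv.anc i hi hb h
        simp at ha
    · rw [if_neg hb, ← hgd]

theorem bfs_main (N : Int) (parent : List Int) (r : Nat)
    (hroot : par parent r = -1) :
    ∀ (fuel : Nat) (depth queue : List Int), BInv N parent r depth queue →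
      queue.length + unsetCnt N parent r depth ≤ fuel →
      aBFS N parent fuel depth queue =
        (List.range N.toNat).map
          (fun w => if belb N parent r w then sv N parent w else depth.getD w 0) := by
  intro fuel
  induction fuel with
  | zero =>
      intro depth queue hInv hm
      cases queue with
      | nil => exact bfs_done N parent r depth hInv 0
      | cons a t => simp at hm
  | succ fuel ih =>
      intro depth queue hInv hm
      cases queue with
      | nil => exact bfs_done N parent r depth hInv (fuel + 1)
      | cons x rest =>
        obtain ⟨c, rfl, hc, hbc, hdc⟩ := hInv.que x List.mem_cons_self
        have hgc : 0 ≤ (c : Int) ∧ (c : Int) < N := by omega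
        have hpc : par parent c ≠ (c : Int) := no_self_parent N parent r c hroot hbc
        have hsvc : 0 ≤ sv N parent c := sv_nonneg_of_bel N parent r c hroot hc hbc
        have hcnotrest : (c : Int) ∉ rest := (List.nodup_cons.1 hInv.nd).1
        have hndrest : rest.Nodup := (List.nodup_cons.1 hInv.nd).2
        obtain ⟨hlen1, hpoint, hq2⟩ :=
          fold_spec parent (c : Int) c rfl hpc (List.range N.toNat) depth rest
            (by intro w hw; rw [hInv.len]; simpa using hw)
        rw [← aInner_eq] at hlen1 hpoint hq2
        set chn := (List.range N.toNat).filter (fun w => par parent w == (c : Int)) with hchn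
        set st := aInner N parent (c : Int) (depth, rest) with hstdef
        -- children facts
        have hchmem : ∀ w ∈ chn, w < N.toNat ∧ par parent w = (c : Int) := by
          intro w hw
          rw [hchn, List.mem_filter, List.mem_range] at hw
          exact ⟨hw.1, by simpa using hw.2⟩
        have hchg : ∀ w ∈ chn, 0 ≤ par parent w ∧ par parent w < N := by
          intro w hw; rw [(hchmem w hw).2]; omega
        have hchtn : ∀ w ∈ chn, (par parent w).toNat = c := by
          intro w hw; rw [(hchmem w hw).2]; omega
        have hchbel : ∀ w ∈ chn, belb N parent r w = true := by
          intro w hw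
          exact bel_step N parent r w c hroot (hchmem w hw).1 (hchg w hw) (hchtn w hw) hbc
        have hchunset : ∀ w ∈ chn, depth.getD w 0 = -1 := by
          intro w hw
          exact hInv.childunset (c : Int) List.mem_cons_self w (hchmem w hw).1 (hchmem w hw).2
        have hchsv : ∀ w ∈ chn, sv N parent w = sv N parent c + 1 := by
          intro w hw
          exact sv_child N parent r w c hroot (hchmem w hw).1 hc (hchg w hw) (hchtn w hw) hbc
        -- pointwise description of the updated depth array
        have hdp : ∀ j : Nat, st.1.getD j 0 =
            if j < N.toNat ∧ par parent j = (c : Int) then sv N parent c + 1 else depth.getD j 0 := by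
          intro j
          rw [hpoint j, hdc]
          by_cases hj : j < N.toNat ∧ par parent j = (c : Int)
          · rw [if_pos ⟨List.mem_range.2 hj.1, hj.2⟩, if_pos hj]
          · rw [if_neg (by rintro ⟨h1, h2⟩; exact hj ⟨List.mem_range.1 h1, h2⟩), if_neg hj]
        have hchinchn : ∀ j : Nat, j < N.toNat → par parent j = (c : Int) → j ∈ chn := by
          intro j h1 h2
          rw [hchn, List.mem_filter, List.mem_range]
          exact ⟨h1, by simpa using h2⟩
        -- one step of the loop
        show aBFS N parent fuel st.1 st.2 = _
        have hInv' : BInv N parent r st.1 st.2 := by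
          constructor
          · rw [hlen1]; exact hInv.len
          · -- notb
            intro w hw hnb
            have hnc : ¬ (w < N.toNat ∧ par parent w = (c : Int)) := by
              rintro ⟨h1, h2⟩
              exact hnb (hchbel w (hchinchn w h1 h2))
            rw [hdp w, if_neg hnc]
            exact hInv.notb w hw hnb
          · -- belset
            intro w hw hb
            rw [hdp w]
            by_cases hwc : w < N.toNat ∧ par parent w = (c : Int)
            · rw [if_pos hwc]
              left
              exact (hchsv w (hchinchn w hwc.1 hwc.2)).symm
            · rw [if_neg hwc]
              exact hInv.belset w hw hb
          · -- que
            intro x hx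
            rw [hq2] at hx
            rcases List.mem_append.1 hx with hx | hx
            · obtain ⟨w, rfl, hw1, hw2, hw3⟩ := hInv.que (_) (List.mem_cons_of_mem _ hx)
              refine ⟨w, rfl, hw1, hw2, ?_⟩
              rw [hdp w]
              by_cases hwc : w < N.toNat ∧ par parent w = (c : Int)
              · rw [if_pos hwc]
                exact (hchsv w (hchinchn w hwc.1 hwc.2)).symm
              · rw [if_neg hwc]; exact hw3
            · obtain ⟨w, hw, rfl⟩ := List.mem_map.1 hx
              refine ⟨w, rfl, (hchmem w hw).1, hchbel w hw, ?_⟩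
              rw [hdp w, if_pos ⟨(hchmem w hw).1, (hchmem w hw).2⟩]
              exact (hchsv w hw).symm
          · -- anc
            intro w hw hb hunset
            have hnc : ¬ (w < N.toNat ∧ par parent w = (c : Int)) := by
              rintro ⟨h1, h2⟩
              rw [hdp w, if_pos ⟨h1, h2⟩] at hunset
              omega
            rw [hdp w, if_neg hnc] at hunset
            obtain ⟨a, ha, k, hk⟩ := hInv.anc w hw hb hunset
            rcases List.mem_cons.1 ha with ha | ha
            · -- ancestor was cur: replace it by the child on the chain to w
              have hac : a = c := by exact_mod_cast ha
              subst hac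
              have hsplit := iter_add N parent k 1 w
              rw [hk] at hsplit
              cases hy : iterN N parent k w with
              | none => rw [hy] at hsplit; simp at hsplit
              | some y =>
                  rw [hy] at hsplit
                  simp only [Option.bind_some] at hsplit
                  have hy1 : iterN N parent 1 y = some a := hsplit.symm
                  have hgy : 0 ≤ par parent y ∧ par parent y < N := by
                    by_contra hng
                    simp only [iterN, if_neg hng] at hy1
                    cases hy1
                  have hyp : (par parent y).toNat = a := by
                    simp only [iterN, if_pos hgy] at hy1
                    simpa using hy1
                  have hypar : par parent y = (a : Int) := by omega
                  cases k with
                  | zero =>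
                      simp only [iterN, Option.some.injEq] at hy
                      subst hy
                      exact absurd ⟨hw, hypar⟩ hnc
                  | succ k' =>
                      have hylt : y < N.toNat := iter_step_lt N parent k' w y hy
                      have hymem : y ∈ chn := hchinchn y hylt hypar
                      refine ⟨y, ?_, k', hy⟩
                      rw [hq2]
                      exact List.mem_append.2 (Or.inr (List.mem_map.2 ⟨y, hymem, rfl⟩))
            · exact ⟨a, by rw [hq2]; exact List.mem_append.2 (Or.inl ha), k, hk⟩
          · -- nodup
            rw [hq2]
            rw [List.nodup_append]
            refine ⟨hndrest, ?_, ?_⟩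
            · exact List.Nodup.map (fun a b h => by exact_mod_cast h)
                (List.Nodup.filter _ List.nodup_range)
            · intro x hx b hb hxb
              subst hxb
              obtain ⟨w, hw, rfl⟩ := List.mem_map.1 hb
              obtain ⟨w', heq, hw1', hw2', hw3'⟩ := hInv.que _ (List.mem_cons_of_mem _ hx)
              have hww : w = w' := by exact_mod_cast heq
              subst hww
              have := hchunset w hw
              have := sv_nonneg_of_bel N parent r w hroot hw1' hw2'
              omega
          · -- childunset
            intro x hx c2 hc2 hp2
            rw [hq2] at hx
            rcases List.mem_append.1 hx with hx | hx
            · have hxnec : x ≠ (c : Int) := fun h => hcnotrest (h ▸ hx)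
              have hold := hInv.childunset x (List.mem_cons_of_mem _ hx) c2 hc2 hp2
              rw [hdp c2, if_neg (by rintro ⟨-, h2⟩; exact hxnec (by rw [← hp2, h2]))]
              exact hold
            · obtain ⟨w, hw, rfl⟩ := List.mem_map.1 hx
              -- c2 is a child of the (previously unset) child w of cur
              have hwun := hchunset w hw
              have hwne : (w : Int) ≠ (c : Int) := by
                intro h
                have : w = c := by exact_mod_cast h
                exact hpc (this ▸ (hchmem w hw).2)
              have hwlt : w < N.toNat := (hchmem w hw).1
              have hnotc : ¬ (c2 < N.toNat ∧ par parent c2 = (c : Int)) := by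
                rintro ⟨-, h2⟩
                exact hwne (by rw [← hp2]; exact h2)
              rw [hdp c2, if_neg hnotc]
              -- suppose c2 were already set
              by_contra hset
              have hbc2 : belb N parent r c2 = true :=
                bel_step N parent r c2 w hroot hc2
                  (by rw [hp2]; omega) (by rw [hp2]; omega) (hchbel w hw)
              have hc2ner : c2 ≠ r := by
                intro h
                rw [h, hroot] at hp2
                omega
              obtain ⟨-, hps⟩ := hInv.parset c2 hc2 hbc2 hset hc2ner
              rw [hp2] at hps
              have : ((w : Int)).toNat = w := by omega
              rw [this] at hps
              exact hps hwun
          · -- parset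
            intro y hy hby hyset hyner
            by_cases hyc : y < N.toNat ∧ par parent y = (c : Int)
            · -- y is a child of cur; its parent is c, which is set and no longer queued
              constructor
              · rw [hyc.2, hq2]
                intro hmem
                rcases List.mem_append.1 hmem with h | h
                · exact hcnotrest h
                · obtain ⟨w, hw, heq⟩ := List.mem_map.1 h
                  have : w = c := by exact_mod_cast heq
                  subst this
                  exact hpc (hchmem w hw).2
              · rw [hyc.2]
                have : ((c : Int)).toNat = c := by omega
                rw [this, hdp c, if_neg (by rintro ⟨-, h2⟩; exact hpc h2)]
                rw [hdc]
                omega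
            · have hyset0 : depth.getD y 0 ≠ -1 := by
                rw [hdp y, if_neg hyc] at hyset
                exact hyset
              obtain ⟨hnq, hps⟩ := hInv.parset y hy hby hyset0 hyner
              constructor
              · rw [hq2]
                intro hmem
                rcases List.mem_append.1 hmem with h | h
                · exact hnq (List.mem_cons_of_mem _ h)
                · obtain ⟨w, hw, heq⟩ := List.mem_map.1 h
                  have hwt : (par parent y).toNat = w := by rw [← heq]; omega
                  rw [hwt] at hps
                  exact hps (hchunset w hw)
              · rw [hdp ((par parent y).toNat)]
                by_cases hpt : (par parent y).toNat < N.toNat ∧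
                    par parent ((par parent y).toNat) = (c : Int)
                · rw [if_pos hpt]; omega
                · rw [if_neg hpt]; exact hps
        -- the measure strictly decreases
        have hcard : st.2.length + unsetCnt N parent r st.1 ≤ fuel := by
          have hql : st.2.length = rest.length + chn.length := by
            rw [hq2, List.length_append, List.length_map]
          have hgcnt : unsetCnt N parent r st.1 + chn.length = unsetCnt N parent r depth := by
            have e1 : unsetCnt N parent r st.1 =
                (List.range N.toNat).countP
                  (fun w => (belb N parent r w && (depth.getD w 0 == -1)) &&
                    !(par parent w == (c : Int))) := by
              rw [unsetCnt, ← List.countP_eq_length_filter]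
              apply List.countP_congr
              intro w hw
              rw [List.mem_range] at hw
              by_cases hwc : par parent w = (c : Int)
              · have hwchn : w ∈ chn := hchinchn w hw hwc
                have h1 : (st.1.getD w 0 == -1) = false := by
                  rw [hdp w, if_pos ⟨hw, hwc⟩]
                  rw [beq_eq_false_iff_ne]
                  omega
                have h2 : (par parent w == (c : Int)) = true := by simpa using hwc
                simp only [h1, h2, Bool.and_false, Bool.not_true]
              · have h1 : st.1.getD w 0 = depth.getD w 0 := by
                  rw [hdp w, if_neg (by rintro ⟨-, h⟩; exact hwc h)]
                have h2 : (par parent w == (c : Int)) = false := by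
                  rw [beq_eq_false_iff_ne]; exact hwc
                simp only [h1, h2, Bool.not_false, Bool.and_true]
            have e2 : chn.length =
                (List.range N.toNat).countP
                  (fun w => (belb N parent r w && (depth.getD w 0 == -1)) &&
                    (par parent w == (c : Int))) := by
              rw [hchn, ← List.countP_eq_length_filter]
              apply List.countP_congr
              intro w hw
              by_cases hwc : par parent w = (c : Int)
              · have hwchn : w ∈ chn := hchinchn w (List.mem_range.1 hw) hwc
                have h2 : (par parent w == (c : Int)) = true := by simpa using hwc
                have h3 : (depth.getD w 0 == -1) = true := by
                  simpa using hchunset w hwchn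
                simp only [h2, h3, hchbel w hwchn, Bool.and_true]
              · have h2 : (par parent w == (c : Int)) = false := by
                  rw [beq_eq_false_iff_ne]; exact hwc
                simp [h2]
            have e3 := countP_split (List.range N.toNat)
              (fun w => belb N parent r w && (depth.getD w 0 == -1))
              (fun w => par parent w == (c : Int))
            have e4 : unsetCnt N parent r depth = (List.range N.toNat).countP
                (fun w => belb N parent r w && (depth.getD w 0 == -1)) := by
              rw [unsetCnt, ← List.countP_eq_length_filter]
            have e5 : unsetCnt N parent r st.1 = (List.range N.toNat).countP
                (fun w => belb N parent r w && (st.1.getD w 0 == -1)) := by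
              rw [unsetCnt, ← List.countP_eq_length_filter]
            omega
          simp only [List.length_cons] at hm
          omega
        rw [ih st.1 st.2 hInv' hcard]
        apply List.map_congr_left
        intro w hw
        rw [List.mem_range] at hw
        by_cases hb : belb N parent r w = true
        · rw [if_pos hb, if_pos hb]
        · rw [if_neg hb, if_neg hb, hdp w,
            if_neg (by rintro ⟨h1, h2⟩; exact hb (hchbel w (hchinchn w h1 h2)))]

theorem oldb_succ (N : Int) (parent : List Int) (m w : Nat) :
    oldb N parent (m + 1) w =
      (oldb N parent m w || (isRootb parent m && belb N parent m w)) := by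
  rw [oldb, oldb, List.range_succ, List.any_append]
  simp

theorem outerArr_getD (N : Int) (parent : List Int) (m w : Nat) (hw : w < N.toNat) :
    (outerArr N parent m).getD w 0 = if oldb N parent m w then sv N parent w else -1 :=
  PySem.List.getD_map_range _ _ _ _ hw

theorem outer_step (N : Int) (parent : List Int) (m : Nat) (hm : m < N.toNat) :
    (if PySem.List.pyGetD parent (m : Int) 0 = -1 then
        aBFS N parent (N.toNat + 1) (PySem.List.pySetD (outerArr N parent m) (m : Int) 0) [(m : Int)]
      else outerArr N parent m) = outerArr N parent (m + 1) := by
  by_cases hv : PySem.List.pyGetD parent (m : Int) 0 = -1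
  · rw [if_pos hv]
    have hroot : par parent m = -1 := by rw [← pyGetD_par]; exact hv
    have hset : PySem.List.pySetD (outerArr N parent m) (m : Int) 0 =
        (outerArr N parent m).set m 0 := by simp
    set d0 := (outerArr N parent m).set m 0 with hd0
    have hlen0 : d0.length = N.toNat := by rw [hd0, List.length_set, outerArr_length]
    have hd0m : d0.getD m 0 = 0 :=
      getD_set_self _ m 0 (by rw [outerArr_length]; exact hm)
    have hd0w : ∀ w, w ≠ m → ∀ (hw : w < N.toNat), d0.getD w 0 =
        if oldb N parent m w then sv N parent w else -1 := by
      intro w hne hw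
      rw [hd0, getD_set_ne _ m w 0 (fun h => hne h.symm), outerArr_getD N parent m w hw]
    have hnold : ∀ w, belb N parent m w = true → oldb N parent m w = false := by
      intro w hb
      by_contra hol
      have hol' : oldb N parent m w = true := by
        revert hol; cases oldb N parent m w <;> simp
      rw [oldb, List.any_eq_true] at hol'
      obtain ⟨r', hr', hrr⟩ := hol'
      rw [List.mem_range] at hr'
      rw [Bool.and_eq_true] at hrr
      have hroot' : par parent r' = -1 := by
        have := hrr.1; rw [isRootb] at this; simpa using this
      have := bel_root_unique N parent m r' w hroot hroot' hb hrr.2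
      omega
    have hsvm : sv N parent m = 0 := sv_root N parent m hroot hm
    have hInv0 : BInv N parent m d0 [(m : Int)] := by
      constructor
      · exact hlen0
      · intro w hw hnb
        have hne : w ≠ m := fun h => hnb (h ▸ bel_self N parent m)
        exact hd0w w hne hw
      · intro w hw hb
        by_cases hne : w = m
        · subst hne; left; rw [hd0m, hsvm]
        · right
          rw [hd0w w hne hw, if_neg (by rw [hnold w hb]; simp)]
      · intro x hx
        rw [List.mem_singleton] at hx
        subst hx
        exact ⟨m, rfl, hm, bel_self N parent m, by rw [hd0m, hsvm]⟩
      · intro w hw hb hunset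
        have hne : w ≠ m := by
          intro h
          rw [h, hd0m] at hunset
          cases hunset
        obtain ⟨k, -, hk⟩ := (bel_iff N parent m w).1 hb
        have hk0 : k ≠ 0 := by
          intro h
          rw [h] at hk
          simp only [iterN, Option.some.injEq] at hk
          exact hne hk
        refine ⟨m, List.mem_singleton_self _, k - 1, ?_⟩
        have : k - 1 + 1 = k := by omega
        rw [this]
        exact hk
      · simp
      · intro x hx c2 hc2 hp2
        rw [List.mem_singleton] at hx
        subst hx
        have hbc2 : belb N parent m c2 = true :=
          bel_step N parent m c2 m hroot hc2 (by rw [hp2]; omega) (by rw [hp2]; omega)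
            (bel_self N parent m)
        have hne : c2 ≠ m := by
          intro h
          rw [h, hroot] at hp2
          omega
        rw [hd0w c2 hne hc2, if_neg (by rw [hnold c2 hbc2]; simp)]
      · intro y hy hby hyset hyne
        exfalso
        apply hyset
        rw [hd0w y hyne hy, if_neg (by rw [hnold y hby]; simp)]
    have hmeas : ([(m : Int)] : List Int).length + unsetCnt N parent m d0 ≤ N.toNat + 1 := by
      have : unsetCnt N parent m d0 ≤ N.toNat := by
        rw [unsetCnt]
        calc ((List.range N.toNat).filter _).length ≤ (List.range N.toNat).length :=
              List.length_filter_le _ _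
          _ = N.toNat := List.length_range
      simp only [List.length_singleton]
      omega
    rw [hset, bfs_main N parent m hroot (N.toNat + 1) d0 [(m : Int)] hInv0 hmeas]
    rw [outerArr]
    apply List.map_congr_left
    intro w hw
    rw [List.mem_range] at hw
    rw [oldb_succ]
    by_cases hb : belb N parent m w = true
    · rw [if_pos hb, if_pos (by
        have hroot' := hroot
        rw [par, List.getD_eq_getElem?_getD] at hroot'
        rw [hb, hnold w hb, isRootb]
        simp [par, List.getD_eq_getElem?_getD, hroot'])]
    · have hb' : belb N parent m w = false := by revert hb; cases belb N parent m w <;> simp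
      rw [if_neg hb]
      have hne : w ≠ m := by
        intro h
        rw [h] at hb'
        rw [bel_self N parent m] at hb'
        cases hb'
      rw [hd0w w hne hw, hb']
      simp
  · rw [if_neg hv]
    have hnroot : par parent m ≠ -1 := by rw [← pyGetD_par]; exact hv
    rw [outerArr, outerArr]
    apply List.map_congr_left
    intro w hw
    rw [oldb_succ]
    have : isRootb parent m = false := by
      rw [isRootb, beq_eq_false_iff_ne]
      exact hnroot
    rw [this]
    simp

theorem outerArr_zero (N : Int) (parent : List Int) :
    outerArr N parent 0 = List.replicate N.toNat (-1) := by
  rw [outerArr]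
  apply List.ext_getElem
  · simp
  · intro i h1 h2
    simp [oldb]

theorem a_eq_outer (N : Int) (parent : List Int) :
    compute_depth_all N parent = outerArr N parent N.toNat := by
  rw [compute_depth_all, pyRange_cast]
  suffices h : ∀ m, m ≤ N.toNat →
      (List.map (fun k : Nat => (k : Int)) (List.range m)).foldl
        (fun depth v =>
          if PySem.List.pyGetD parent v 0 = -1 then
            aBFS N parent (N.toNat + 1) (PySem.List.pySetD depth v 0) [v]
          else depth)
        (List.replicate N.toNat (-1)) = outerArr N parent m by
    exact h N.toNat le_rfl
  intro m
  induction m with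
  | zero => intro _; rw [outerArr_zero]; rfl
  | succ m ih =>
      intro hm1
      rw [List.range_succ, List.map_append, List.foldl_append, ih (by omega)]
      simp only [List.map_cons, List.map_nil, List.foldl_cons, List.foldl_nil]
      exact outer_step N parent m (by omega)



-- ===== VERDICT (by name: the statement is the Claim_ definition above) =====
theorem compute_depth_all_spec : Claim_equal_compute_depth_all := by
  intro N parent _ _
  unfold Spec_compute_depth_all
  rw [a_eq_outer, b_eq_outer]
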